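-- pv_equiv track=rewrite | github.com/ShuzhanSun/ECE57000_TermProject_SS | ST_two_layer_perceptron.py | all_labels
-- ===== SOURCE A (Python) =====
-- def all_labels(labels):
--     red = False
--     blue = False
--     for label in labels:
--         if label < 0:
--             red = True
--         else:
--             blue = True
--     return red and blue
-- ===== SOURCE B (Python) =====
-- def all_labels(labels):
--     return any(l < 0 for l in labels) and any(l >= 0 for l in labels)
-- ===== Notes on version B (the rewrite author's own statement) =====
-- stated objective: idiomatic
-- what changed: Replaces the single flag-setting loop by two independent short-circuiting any() scans, one per sign predicate.
import Mathlib
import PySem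

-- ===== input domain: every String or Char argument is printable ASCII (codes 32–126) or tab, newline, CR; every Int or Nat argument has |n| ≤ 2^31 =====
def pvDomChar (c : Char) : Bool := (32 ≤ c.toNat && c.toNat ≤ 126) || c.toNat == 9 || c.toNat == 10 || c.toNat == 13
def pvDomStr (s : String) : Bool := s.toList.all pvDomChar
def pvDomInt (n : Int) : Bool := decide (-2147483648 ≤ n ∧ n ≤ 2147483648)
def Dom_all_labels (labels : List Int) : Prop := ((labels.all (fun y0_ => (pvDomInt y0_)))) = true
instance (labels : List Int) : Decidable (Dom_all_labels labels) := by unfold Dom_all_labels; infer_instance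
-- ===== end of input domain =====

-- B replaces A's one-pass two-flag loop by two independent short-circuiting any-scans (idiomatic).

-- ===== PORT A =====
-- loop carrying the two flags (red, blue), exactly A's loop body
def all_labels_loop (labels : List Int) (red blue : Bool) : Bool × Bool :=
  match labels with
  | [] => (red, blue)
  | l :: rest =>
    if l < 0 then all_labels_loop rest true blue
    else all_labels_loop rest red true

def all_labels (labels : List Int) : Bool :=
  let (red, blue) := all_labels_loop labels false false
  red && blue

-- ===== PORT B =====
def all_labels_alt (labels : List Int) : Bool :=
  (labels.any (fun l => decide (l < 0))) && (labels.any (fun l => decide (l ≥ 0)))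

-- ===== PRECONDITION & SPEC =====
def Spec_all_labels (labels : List Int) (out : Bool) : Prop := out = all_labels_alt labels
instance (labels : List Int) (out : Bool) : Decidable (Spec_all_labels labels out) := by unfold Spec_all_labels; infer_instance

-- ===== CLAIM (what is proved, stated in full; the proofs are below) =====
def Claim_equal_all_labels : Prop := ∀ (labels : List Int), Dom_all_labels labels → Spec_all_labels labels (all_labels labels)

-- ===== LEMMAS AND PROOFS =====
theorem all_labels_loop_eq (labels : List Int) (red blue : Bool) :
    all_labels_loop labels red blue =
      (red || labels.any (fun l => decide (l < 0)),
       blue || labels.any (fun l => decide (l ≥ 0))) := by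
  induction labels generalizing red blue with
  | nil => simp [all_labels_loop]
  | cons l rest ih =>
    by_cases h : l < 0
    · have h0 : ¬ (0 : Int) ≤ l := by omega
      simp [all_labels_loop, h, ih, h0]
    · have h' : (0 : Int) ≤ l := by omega
      simp [all_labels_loop, h, ih, h']

-- ===== VERDICT (by name: the statement is the Claim_ definition above) =====
theorem all_labels_spec : Claim_equal_all_labels := by
  intro labels _
  unfold Spec_all_labels all_labels all_labels_alt
  rw [all_labels_loop_eq]
  simp
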